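-- pv_equiv track=rewrite | github.com/artemvovk/practice | python/cracking/hard.py | baby_names
-- ===== SOURCE A (Python) =====
-- def baby_names(name_stats, synonyms):
--     all_names = {}
--     all_stats = {}
--     for pair in synonyms:
--         entry = all_names.get(pair[0], set())
--         entry.add(pair[1])
--         entry.add(pair[0])
--         all_names.update({pair[0]: entry})
--         entry = all_names.get(pair[1], set())
--         entry.add(pair[1])
--         entry.add(pair[0])
--         all_names.update({pair[1]: entry})
--     for name_stat in name_stats:
--         nicks = all_names.get(name_stat[0], [])
--         for nick in nicks:
--             total = all_stats.get(nick, 0)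
--             total += name_stat[1]
--             all_stats.update({nick: total})
--     return all_stats
-- ===== SOURCE B (Python) =====
-- def baby_names(name_stats, synonyms):
--     # gather instead of scatter: precompute per-name totals once, then give each
--     # nick its final value in one shot the first time a stat touches it
--     adj = {}
--     for pair in synonyms:
--         for x in (pair[0], pair[1]):
--             entry = adj.setdefault(x, set())
--             entry.add(pair[1])
--             entry.add(pair[0])
--     counts = {}
--     for name, c in name_stats:
--         counts[name] = counts.get(name, 0) + c
--     result = {}
--     for name, _ in name_stats:
--         for nick in adj.get(name, ()):
--             if nick not in result:
--                 result[nick] = sum(counts.get(n, 0) for n in adj[nick])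
--     return result
-- ===== Notes on version B (the rewrite author's own statement) =====
-- stated objective: alternative
-- what changed: Replaces A's scatter loop (each stat incrementally added to every neighbor's running total) by a gather: per-name totals are summed once into a counts table, and each result key receives its final value in one shot -- the sum of its neighbors' totals -- the first time a stat touches it.
import Mathlib
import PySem

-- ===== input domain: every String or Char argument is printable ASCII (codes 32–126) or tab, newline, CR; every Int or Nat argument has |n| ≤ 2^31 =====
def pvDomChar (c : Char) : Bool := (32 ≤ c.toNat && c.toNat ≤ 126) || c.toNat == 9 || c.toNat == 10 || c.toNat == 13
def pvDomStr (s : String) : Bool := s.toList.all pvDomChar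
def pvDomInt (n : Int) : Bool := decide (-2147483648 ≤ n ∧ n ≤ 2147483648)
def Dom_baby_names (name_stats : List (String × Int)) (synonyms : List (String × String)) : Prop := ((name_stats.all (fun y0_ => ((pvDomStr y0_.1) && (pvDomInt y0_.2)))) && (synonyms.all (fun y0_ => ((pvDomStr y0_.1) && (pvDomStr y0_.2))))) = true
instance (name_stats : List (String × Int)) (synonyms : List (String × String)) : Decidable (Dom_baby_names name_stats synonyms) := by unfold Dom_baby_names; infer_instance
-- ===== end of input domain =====

-- B replaces A's scatter loop (every stat incrementally added to each neighbor's running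
-- total) by a gather over a precomputed counts table, writing each result key exactly once
-- (objective: alternative decomposition, same asymptotic cost).
-- Both Pythons return dicts; the ports fix the iteration order of A's Python sets as
-- first-insertion order (Python's own set/hash order is not part of the value compared).

-- ===== PORT A =====
def baby_names (name_stats : List (String × Int)) (synonyms : List (String × String)) : List (String × Int) :=
  let all_names : PySem.Dict String (PySem.Set String) :=
    synonyms.foldl (fun d pair =>
      let d := d.insert pair.1 (PySem.Set.add (PySem.Set.add (d.getD pair.1 PySem.Set.empty) pair.2) pair.1)
      d.insert pair.2 (PySem.Set.add (PySem.Set.add (d.getD pair.2 PySem.Set.empty) pair.2) pair.1))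
      PySem.Dict.empty
  let all_stats : PySem.Dict String Int :=
    name_stats.foldl (fun s stat =>
      (all_names.getD stat.1 []).foldl (fun s nick => s.insert nick (s.getD nick 0 + stat.2)) s)
      PySem.Dict.empty
  all_stats.items

-- ===== PORT B =====
def baby_names_alt (name_stats : List (String × Int)) (synonyms : List (String × String)) : List (String × Int) :=
  let adj : PySem.Dict String (PySem.Set String) :=
    synonyms.foldl (fun d pair =>
      [pair.1, pair.2].foldl (fun d x =>
        d.insert x (PySem.Set.add (PySem.Set.add (d.getD x PySem.Set.empty) pair.2) pair.1)) d)
      PySem.Dict.empty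
  let counts : PySem.Dict String Int :=
    name_stats.foldl (fun c stat => c.insert stat.1 (c.getD stat.1 0 + stat.2)) PySem.Dict.empty
  let result : PySem.Dict String Int :=
    name_stats.foldl (fun r stat =>
      (adj.getD stat.1 []).foldl (fun r nick =>
        if r.contains nick then r
        -- adj[nick]: nick is always a key of adj (it was drawn from adj's values), so the
        -- total getD with default [] computes exactly Python's adj[nick]
        else r.insert nick ((adj.getD nick []).foldl (fun t n => t + counts.getD n 0) 0)) r)
      PySem.Dict.empty
  result.items

-- ===== PRECONDITION & SPEC =====
def Spec_baby_names (name_stats : List (String × Int)) (synonyms : List (String × String)) (out : List (String × Int)) : Prop := out = baby_names_alt name_stats synonyms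
instance (name_stats : List (String × Int)) (synonyms : List (String × String)) (out : List (String × Int)) : Decidable (Spec_baby_names name_stats synonyms out) := by unfold Spec_baby_names; infer_instance

-- ===== CLAIM (what is proved, stated in full; the proofs are below) =====
def Claim_equal_baby_names : Prop := ∀ (name_stats : List (String × Int)) (synonyms : List (String × String)), Dom_baby_names name_stats synonyms → Spec_baby_names name_stats synonyms (baby_names name_stats synonyms)

-- ===== LEMMAS AND PROOFS =====

-- abbreviations for the proof layer
def pvAdjStep (d : PySem.Dict String (PySem.Set String)) (pair : String × String) :
    PySem.Dict String (PySem.Set String) :=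
  let d := d.insert pair.1 (PySem.Set.add (PySem.Set.add (d.getD pair.1 PySem.Set.empty) pair.2) pair.1)
  d.insert pair.2 (PySem.Set.add (PySem.Set.add (d.getD pair.2 PySem.Set.empty) pair.2) pair.1)

def pvAdj (synonyms : List (String × String)) : PySem.Dict String (PySem.Set String) :=
  synonyms.foldl pvAdjStep PySem.Dict.empty

def pvN (synonyms : List (String × String)) (k : String) : List String :=
  (pvAdj synonyms).getD k []

-- membership characterization of one adjacency step
lemma pvAdjStep_mem (d : PySem.Dict String (PySem.Set String)) (a b x y : String) :
    y ∈ (pvAdjStep d (a, b)).getD x [] ↔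
      y ∈ d.getD x [] ∨ ((x = a ∨ x = b) ∧ (y = a ∨ y = b)) := by
  by_cases hab : b = a
  · subst hab
    by_cases hxb : x = b <;>
      simp [pvAdjStep, PySem.Dict.getD_insert, PySem.Set.mem_add, hxb]
  · by_cases hxb : x = b <;> by_cases hxa : x = a <;>
      simp [pvAdjStep, PySem.Dict.getD_insert, PySem.Set.mem_add, hxb, hxa, hab, Ne.symm hab] <;>
      tauto

lemma pvAdjStep_nodup (d : PySem.Dict String (PySem.Set String))
    (h : ∀ x, (d.getD x []).Nodup) (a b x : String) :
    ((pvAdjStep d (a, b)).getD x []).Nodup := by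
  by_cases hab : b = a
  · subst hab
    by_cases hxb : x = b <;>
      simp [pvAdjStep, PySem.Dict.getD_insert, hxb] <;>
      (repeat apply PySem.Set.nodup_add) <;> exact h _
  · by_cases hxb : x = b <;> by_cases hxa : x = a <;>
      simp [pvAdjStep, PySem.Dict.getD_insert, hxb, hxa, hab, Ne.symm hab] <;>
      (repeat apply PySem.Set.nodup_add) <;> exact h _

lemma pvAdj_inv (synonyms : List (String × String)) :
    ∀ d : PySem.Dict String (PySem.Set String),
      (∀ x, (d.getD x []).Nodup) →
      (∀ x y, y ∈ d.getD x [] ↔ x ∈ d.getD y []) →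
      (∀ x, ((synonyms.foldl pvAdjStep d).getD x []).Nodup) ∧
      (∀ x y, y ∈ (synonyms.foldl pvAdjStep d).getD x [] ↔ x ∈ (synonyms.foldl pvAdjStep d).getD y []) := by
  induction synonyms with
  | nil => intro d h1 h2; exact ⟨h1, h2⟩
  | cons p sy ih =>
    intro d h1 h2
    simp only [List.foldl_cons]
    refine ih _ (fun x => pvAdjStep_nodup d h1 p.1 p.2 x) ?_
    intro x y
    rw [show p = (p.1, p.2) from rfl, pvAdjStep_mem, pvAdjStep_mem, h2]
    tauto

lemma pvN_nodup (synonyms : List (String × String)) (k : String) : (pvN synonyms k).Nodup :=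
  (pvAdj_inv synonyms PySem.Dict.empty (by simp [PySem.Dict.getD_empty])
    (by simp [PySem.Dict.getD_empty])).1 k

lemma pvN_symm (synonyms : List (String × String)) (x y : String) :
    y ∈ pvN synonyms x ↔ x ∈ pvN synonyms y :=
  (pvAdj_inv synonyms PySem.Dict.empty (by simp [PySem.Dict.getD_empty])
    (by simp [PySem.Dict.getD_empty])).2 x y

-- ===== stage 2 =====
def pvTotal (p : List (String × Int)) (n : String) : Int :=
  (p.map (fun st => if st.1 = n then st.2 else 0)).sum

def pvS (N : String → List String) (p : List (String × Int)) (k : String) : Int :=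
  (p.map (fun st => if k ∈ N st.1 then st.2 else 0)).sum

-- counts table computes per-name totals
lemma pvCounts_getD (p : List (String × Int)) :
    ∀ (c : PySem.Dict String Int) (n : String),
      (p.foldl (fun c stat => c.insert stat.1 (c.getD stat.1 0 + stat.2)) c).getD n 0
        = c.getD n 0 + pvTotal p n := by
  induction p with
  | nil => intro c n; simp [pvTotal]
  | cons st l ih =>
    intro c n
    simp only [List.foldl_cons, ih, pvTotal, List.map_cons, List.sum_cons]
    by_cases h : st.1 = n
    · subst h; simp [PySem.Dict.getD_insert]; ring
    · simp [PySem.Dict.getD_insert, Ne.symm h, h]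

lemma pv_sum_if_mem (m : String) (c : Int) :
    ∀ (l : List String), l.Nodup →
      (l.map (fun n => if m = n then c else 0)).sum = if m ∈ l then c else 0 := by
  intro l
  induction l with
  | nil => simp
  | cons x l ih =>
    intro hnd
    rcases List.nodup_cons.mp hnd with ⟨hx, hnd'⟩
    by_cases h : m = x
    · subst h
      simp [ih hnd', hx]
    · simp [h, ih hnd']

-- the regrouping: gathering neighbors' totals = scattering the stats
lemma pv_regroup (N : String → List String) (hnd : ∀ k, (N k).Nodup)
    (hsym : ∀ x y, y ∈ N x ↔ x ∈ N y) (p : List (String × Int)) (k : String) :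
    ((N k).map (fun n => pvTotal p n)).sum = pvS N p k := by
  induction p with
  | nil => simp [pvTotal, pvS]
  | cons st l ih =>
    have hsplit : ((N k).map (fun n => pvTotal (st :: l) n)).sum
        = ((N k).map (fun n => if st.1 = n then st.2 else 0)).sum
          + ((N k).map (fun n => pvTotal l n)).sum := by
      simp only [pvTotal, List.map_cons, List.sum_cons]
      rw [← PySem.List.sum_map_add_int]
    rw [hsplit, ih, pv_sum_if_mem st.1 st.2 (N k) (hnd k)]
    simp only [pvS, List.map_cons, List.sum_cons]
    simp [hsym st.1 k]

-- A's inner scatter loop, value view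
lemma pvA_inner_getD (c : Int) :
    ∀ (l : List String), l.Nodup → ∀ (d : PySem.Dict String Int) (k : String),
      (l.foldl (fun s nick => s.insert nick (s.getD nick 0 + c)) d).getD k 0
        = d.getD k 0 + (if k ∈ l then c else 0) := by
  intro l
  induction l with
  | nil => intro _ d k; simp
  | cons x l ih =>
    intro hnd d k
    rcases List.nodup_cons.mp hnd with ⟨hx, hnd'⟩
    simp only [List.foldl_cons, ih hnd']
    by_cases h : k = x
    · subst h
      simp [if_neg hx]
    · simp [PySem.Dict.getD_insert, h]

-- B's inner gather loop, value view
lemma pvB_inner_getD (g : String → Int) :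
    ∀ (l : List String) (d : PySem.Dict String Int) (k : String),
      (l.foldl (fun r nick => if r.contains nick then r else r.insert nick (g nick)) d).getD k 0
        = if d.contains k then d.getD k 0 else if k ∈ l then g k else 0 := by
  intro l
  induction l with
  | nil =>
    intro d k
    by_cases h : d.contains k
    · simp [h]
    · simp [h, PySem.Dict.getD_of_not_contains d 0 (by simpa using h)]
  | cons x l ih =>
    intro d k
    simp only [List.foldl_cons]
    by_cases hx : d.contains x
    · rw [if_pos hx, ih]
      by_cases hk : d.contains k
      · simp [hk]
      · have hkx : ¬ k = x := by
          intro he; subst he; exact hk hx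
        simp [hk, hkx]
    · rw [if_neg hx, ih]
      by_cases hkx : k = x
      · subst hkx
        simp [hx]
      · simp [PySem.Dict.contains_insert, PySem.Dict.getD_insert, hkx]

-- B's inner gather loop, keys view
lemma pvB_inner_keys (g : String → Int) :
    ∀ (l : List String) (d : PySem.Dict String Int),
      (l.foldl (fun r nick => if r.contains nick then r else r.insert nick (g nick)) d).keys
        = PySem.Set.update d.keys l := by
  intro l
  induction l with
  | nil => intro d; simp [PySem.Set.update]
  | cons x l ih =>
    intro d
    simp only [List.foldl_cons, PySem.Set.update_cons]
    by_cases hx : d.contains x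
    · rw [if_pos hx, ih, PySem.Set.add_of_mem ((PySem.Dict.contains_iff_mem_keys d x).mp hx)]
    · rw [if_neg hx, ih, PySem.Dict.keys_insert_of_not_contains d _ (by simpa using hx),
        PySem.Set.add_of_not_mem (fun hm => hx ((PySem.Dict.contains_iff_mem_keys d x).mpr hm))]

def pvCounts (name_stats : List (String × Int)) : PySem.Dict String Int :=
  name_stats.foldl (fun c stat => c.insert stat.1 (c.getD stat.1 0 + stat.2)) PySem.Dict.empty

def pvG (name_stats : List (String × Int)) (synonyms : List (String × String)) (nick : String) : Int :=
  (pvN synonyms nick).foldl (fun t n => t + (pvCounts name_stats).getD n 0) 0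

-- B's per-pair adjacency update (a 2-element inner loop) is A's per-pair update
lemma pv_step_eq : (fun (d : PySem.Dict String (PySem.Set String)) (pair : String × String) =>
    [pair.1, pair.2].foldl (fun d x =>
      d.insert x (PySem.Set.add (PySem.Set.add (d.getD x PySem.Set.empty) pair.2) pair.1)) d)
    = pvAdjStep := by
  funext d pair
  simp [List.foldl, pvAdjStep]

lemma baby_names_eq (ns : List (String × Int)) (sy : List (String × String)) :
    baby_names ns sy
      = (ns.foldl (fun s stat =>
          (pvN sy stat.1).foldl (fun s nick => s.insert nick (s.getD nick 0 + stat.2)) s)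
          PySem.Dict.empty).items := rfl

lemma baby_names_alt_eq (ns : List (String × Int)) (sy : List (String × String)) :
    baby_names_alt ns sy
      = (ns.foldl (fun r stat =>
          (pvN sy stat.1).foldl (fun r nick =>
            if r.contains nick then r else r.insert nick (pvG ns sy nick)) r)
          PySem.Dict.empty).items := by
  unfold baby_names_alt
  rw [pv_step_eq]
  rfl

-- the joint invariant of the two outer folds: same key list, A holds the scattered partial
-- sums, B holds the gathered final values
lemma pv_main (N : String → List String) (hnd : ∀ k, (N k).Nodup) (G : String → Int) :
    ∀ (p : List (String × Int)),
      (p.foldl (fun s stat =>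
          (N stat.1).foldl (fun s nick => s.insert nick (s.getD nick 0 + stat.2)) s)
          PySem.Dict.empty).keys
        = (p.foldl (fun r stat =>
          (N stat.1).foldl (fun r nick =>
            if r.contains nick then r else r.insert nick (G nick)) r)
          PySem.Dict.empty).keys
      ∧ (p.foldl (fun s stat =>
          (N stat.1).foldl (fun s nick => s.insert nick (s.getD nick 0 + stat.2)) s)
          PySem.Dict.empty).keys.Nodup
      ∧ (∀ k, (p.foldl (fun s stat =>
          (N stat.1).foldl (fun s nick => s.insert nick (s.getD nick 0 + stat.2)) s)
          PySem.Dict.empty).getD k 0 = pvS N p k)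
      ∧ (∀ k, k ∈ (p.foldl (fun r stat =>
          (N stat.1).foldl (fun r nick =>
            if r.contains nick then r else r.insert nick (G nick)) r)
          PySem.Dict.empty).keys →
          (p.foldl (fun r stat =>
          (N stat.1).foldl (fun r nick =>
            if r.contains nick then r else r.insert nick (G nick)) r)
          PySem.Dict.empty).getD k 0 = G k) := by
  intro p
  induction p using List.reverseRecOn with
  | nil => simp [pvS]
  | append_singleton p st ih =>
    obtain ⟨hkeys, hnodup, hA, hB⟩ := ih
    simp only [List.foldl_append, List.foldl_cons, List.foldl_nil]
    refine ⟨?_, ?_, ?_, ?_⟩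
    · rw [PySem.Dict.keys_foldl_insert, pvB_inner_keys, hkeys]
    · exact PySem.Dict.nodup_keys_foldl_insert _ _ _ hnodup
    · intro k
      rw [pvA_inner_getD st.2 (N st.1) (hnd st.1) _ k, hA k]
      simp [pvS, List.map_append, List.sum_append]
    · intro k hk
      rw [pvB_inner_getD]
      by_cases hc : (p.foldl (fun r stat =>
          (N stat.1).foldl (fun r nick =>
            if r.contains nick then r else r.insert nick (G nick)) r)
          PySem.Dict.empty).contains k
      · rw [if_pos hc]
        exact hB k ((PySem.Dict.contains_iff_mem_keys _ _).mp hc)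
      · rw [if_neg hc, if_pos ?_]
        rw [pvB_inner_keys, PySem.Set.mem_update] at hk
        rcases hk with hk | hk
        · exact absurd ((PySem.Dict.contains_iff_mem_keys _ _).mpr hk) hc
        · exact hk

lemma pv_final (ns : List (String × Int)) (sy : List (String × String)) :
    baby_names ns sy = baby_names_alt ns sy := by
  rw [baby_names_eq, baby_names_alt_eq]
  obtain ⟨hkeys, hnodup, hA, hB⟩ := pv_main (pvN sy) (pvN_nodup sy) (pvG ns sy) ns
  rw [PySem.Dict.items_eq_map_keys _ hnodup 0,
      PySem.Dict.items_eq_map_keys _ (hkeys ▸ hnodup) 0, ← hkeys]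
  refine List.map_congr_left ?_
  intro k hk
  have hG : pvG ns sy k = pvS (pvN sy) ns k := by
    rw [pvG, PySem.List.foldl_add]
    have hmap : ((pvN sy k).map (fun n => (pvCounts ns).getD n 0)).sum
        = ((pvN sy k).map (fun n => pvTotal ns n)).sum := by
      refine congrArg List.sum (List.map_congr_left ?_)
      intro n _
      rw [pvCounts, pvCounts_getD ns PySem.Dict.empty n, PySem.Dict.getD_empty]; ring
    rw [hmap, pv_regroup (pvN sy) (pvN_nodup sy) (pvN_symm sy) ns k]
    simp
  rw [hA k, hB k (hkeys ▸ hk), hG]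

-- ===== VERDICT (by name: the statement is the Claim_ definition above) =====
theorem baby_names_spec : Claim_equal_baby_names := by
  intro name_stats synonyms _
  unfold Spec_baby_names
  exact pv_final name_stats synonyms
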